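-- pv_equiv track=rewrite | github.com/dimitrijray/ecc-binary-field | binop.py | genIrred
-- ===== SOURCE A (Python) =====
-- def mod(num,numR):
--     """Returns the remainder of the polynomial division num/numR"""
--     P=int(num,2)
--     R=int(numR,2)
--     degP=len(num)-1
--     degR=len(numR)-1
--     if degR!=0:
--         while (degR<=degP):
--             setDeg=degP-degR
--             R_1=R<<setDeg
--             P=P^R_1
--             degP=len(bin(P)[2:])-1
--     else:
--         P=0
--     return bin(P)[2:]
--
-- def add(numA,numB):
--     """Returns numA + numB"""
--     #This algorithm will do bitwise-XOR-ing between A and B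
--     A=int(numA,2)
--     B=int(numB,2)
--     result = A^B
--     return bin(result)[2:]
--
-- def square(numA):
--     """Returns numA^2"""
--     #Quick squaring: just add zeroes.
--     if numA[0]=='0':
--         B=0
--     elif numA[0]=='1':
--         B=1
--     for i in range(1,len(numA)):
--         B=B<<2
--         if numA[i]=='1':
--             B=B^1
--     return bin(B)[2:]
--
-- def euclid(numA,numB):
--     """Returns gcd(numA,numB)"""
--     #Initialization
--     A=numA
--     B=numB
--     R=B
--     while R!='0':
--         R=mod(A,B)
--         A=B
--         B=R
--     return A
--
-- def isIrred(poly):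
--     """Checks whether polynomial poly is irreducible"""
--     deg=len(poly)-1
--     u='10'
--     status=1
--     for i in range(deg//2):
--         u = mod(square(u),poly)
--         d = euclid(poly,add(u,'10'))
--         if d!='1':
--             status=0
--             break
--     return status
--
-- def genIrred(n):
--     """Generates an irreducible polynomial of degree n"""
--     #Brute force trinomials.
--     for i in range(1,n):
--         thePoly=1
--         NextDeg=n-i
--         thePoly=(thePoly<<NextDeg)^1
--         thePoly=(thePoly<<i)^1
--         if isIrred(bin(thePoly)[2:]):
--             return bin(thePoly)[2:]
--             break
--         else:
--             pass
--     for i in range(3,n):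
--         for j in range(2,i):
--             for k in range(1,j):
--                 #polinom x^n+x^i+x^j+x^k+1
--                 thePoly=1
--                 NextDeg=n-i
--                 thePoly=(thePoly<<NextDeg)^1
--                 NextDeg=i-j
--                 thePoly=(thePoly<<NextDeg)^1
--                 NextDeg=j-k
--                 thePoly=(thePoly<<NextDeg)^1
--                 thePoly=(thePoly<<k)^1
--                 if isIrred(bin(thePoly)[2:]):
--                     return bin(thePoly)[2:]
--                     break
--                 else:
--                     pass
--     return "N/A"
-- ===== SOURCE B (Python) =====
-- # Candidate-stream + first-match search with restructured helpers: candidates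
-- # (trinomials then pentanomials) come out of one lazy generator of bit-mask ints
-- # and the first irreducible one is picked with next(); the remainder is computed
-- # by folding with the defining relation x^n = low(b) (xor the high part in at
-- # every set bit of b), the gcd by a flat shift-and-xor loop with no remainder
-- # subroutine, squaring by re-reading the binary digits in radix four, and the
-- # Ben-Or iterates are staged into a list and checked with all().
--
-- def _sq(a):
--     """Square in GF(2)[x]: the binary digits re-read in radix four."""
--     return int(bin(a)[2:], 4)
--
-- def _rem(a, b):
--     """a mod b in GF(2)[x] by folding x^n = low(b) (a mod 1 = 0)."""
--     n = b.bit_length() - 1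
--     if n <= 0:
--         return 0
--     low = b ^ (1 << n)
--     exps = []
--     while low:
--         e = low.bit_length() - 1
--         exps.append(e)
--         low ^= 1 << e
--     mask = (1 << n) - 1
--     while a.bit_length() > n:
--         h = a >> n
--         a &= mask
--         for e in exps:
--             a ^= h << e
--     return a
--
-- def _gcd(a, b):
--     """gcd in GF(2)[x] by a flat shift-and-xor loop (no division)."""
--     while b:
--         if a.bit_length() < b.bit_length():
--             a, b = b, a
--         a ^= b << (a.bit_length() - b.bit_length())
--     return a
--
-- def _irred(p):
--     """Ben-Or test: stage the iterates x^(2^i) mod p, then check every gcd."""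
--     us = []
--     u = 2
--     for _ in range((p.bit_length() - 1) // 2):
--         u = _rem(_sq(u), p)
--         us.append(u)
--     return all(_gcd(p, u ^ 2) == 1 for u in us)
--
-- def _cands(n):
--     """All candidate polynomials in search order, as a lazy stream."""
--     for i in range(1, n):
--         yield (1 << n) ^ (1 << i) ^ 1
--     for i in range(3, n):
--         for j in range(2, i):
--             for k in range(1, j):
--                 yield (1 << n) ^ (1 << i) ^ (1 << j) ^ (1 << k) ^ 1
--
-- def genIrred(n):
--     """Generates an irreducible polynomial of degree n"""
--     p = next((c for c in _cands(n) if _irred(c)), None)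
--     return format(p, 'b') if p is not None else "N/A"
-- ===== Notes on version B (the rewrite author's own statement) =====
-- stated objective: alternative
-- what changed: B streams the candidate polynomials (trinomials then pentanomials) from one lazy generator of bit-mask ints and picks the first irreducible one with next(), and replaces every helper algorithm: the remainder is computed by folding with the defining relation x^n = low(b) (xor the shifted high part in at every set bit of b) instead of A's one-bit-at-a-time top reduction, the gcd by a single flat shift-and-xor loop with no division/remainder subroutine instead of A's Euclid-with-mod, squaring by re-reading the binary digits in radix four instead of A's digit-character scan, and the Ben-Or …
import Mathlib
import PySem

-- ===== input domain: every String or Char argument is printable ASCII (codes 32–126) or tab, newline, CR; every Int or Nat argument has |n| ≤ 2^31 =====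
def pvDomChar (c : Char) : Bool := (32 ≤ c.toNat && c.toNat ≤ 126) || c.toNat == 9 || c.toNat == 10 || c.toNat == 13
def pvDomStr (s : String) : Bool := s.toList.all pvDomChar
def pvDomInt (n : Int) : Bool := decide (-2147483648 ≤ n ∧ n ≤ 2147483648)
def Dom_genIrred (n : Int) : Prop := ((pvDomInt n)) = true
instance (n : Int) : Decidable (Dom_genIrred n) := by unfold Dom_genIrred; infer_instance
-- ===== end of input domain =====

-- B streams the ordered candidates from one generator and takes the first irreducible one,
-- with restructured integer helpers (remainder by folding with the relation x^n = low(b),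
-- gcd by a flat shift-and-xor loop with no remainder subroutine, square by re-reading the
-- binary digits in radix four, staged Ben-Or iterates checked with all()); objective: alternative.  Loops carry explicit fuel parameters that are pure totality
-- guards (the lemma section proves the measured quantity strictly decreases).

-- ===== PORT A =====

-- int(cs, 2): exact on nonempty strings of '0'/'1' digits, which is the only kind of
-- argument A's helpers ever pass (every argument is a bin(..)[2:] output).
def pvParseBin (cs : List Char) : Nat :=
  cs.foldl (fun a c => 2 * a + (if c = '1' then 1 else 0)) 0

-- bin(n)[2:] for n ≥ 0
def pvToBin (n : Nat) : List Char := PySem.Int.toBinChars (n : Int)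

-- the while-loop of mod: state (P, degP); fuel P+1 suffices (P strictly decreases)
def pvAModLoop (R degR : Nat) : Nat → Nat → Nat → Nat
  | 0, P, _ => P
  | fuel + 1, P, degP =>
    if degR ≤ degP then
      let P' := P ^^^ (R <<< (degP - degR))
      pvAModLoop R degR fuel P' ((pvToBin P').length - 1)
    else P

def pvAMod (num numR : List Char) : List Char :=
  let P := pvParseBin num
  let R := pvParseBin numR
  let degP := num.length - 1
  let degR := numR.length - 1
  if degR ≠ 0 then pvToBin (pvAModLoop R degR (P + 1) P degP) else pvToBin 0

def pvAAdd (numA numB : List Char) : List Char :=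
  pvToBin (pvParseBin numA ^^^ pvParseBin numB)

def pvASquare (numA : List Char) : List Char :=
  let B0 : Nat :=
    match numA with          -- numA[0]: '0'/'1' are the only chars occurring (bin outputs)
    | '0' :: _ => 0
    | '1' :: _ => 1
    | _ => 0
  pvToBin ((numA.drop 1).foldl (fun B c => (B <<< 2) ^^^ (if c = '1' then 1 else 0)) B0)

-- euclid's while-loop: state (A, B, R); fuel int(B,2)+1 suffices (B strictly decreases)
def pvAEuclidLoop : Nat → List Char → List Char → List Char → List Char
  | 0, A, _, _ => A
  | fuel + 1, A, B, R =>
    if R ≠ ['0'] then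
      let R' := pvAMod A B
      pvAEuclidLoop fuel B R' R'
    else A

def pvAEuclid (numA numB : List Char) : List Char :=
  pvAEuclidLoop (pvParseBin numB + 1) numA numB numB

def pvAIsIrredLoop (poly : List Char) : Nat → List Char → Int
  | 0, _ => 1
  | k + 1, u =>
    let u' := pvAMod (pvASquare u) poly
    let d := pvAEuclid poly (pvAAdd u' ['1', '0'])
    if d ≠ ['1'] then 0 else pvAIsIrredLoop poly k u'

def pvAIsIrred (poly : List Char) : Int :=
  pvAIsIrredLoop poly ((poly.length - 1) / 2) ['1', '0']

-- shift amounts n-i, i, i-j, j-k, k are all ≥ 0 on the ranges traversed, so .toNat is exact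
def pvATriLoop (n : Int) : List Int → Option (List Char)
  | [] => none
  | i :: rest =>
    let thePoly : Nat := ((((1 : Nat) <<< (n - i).toNat) ^^^ 1) <<< i.toNat) ^^^ 1
    if pvAIsIrred (pvToBin thePoly) ≠ 0 then some (pvToBin thePoly)
    else pvATriLoop n rest

def pvAPenLoopK (n i j : Int) : List Int → Option (List Char)
  | [] => none
  | k :: rest =>
    let thePoly : Nat :=
      ((((((((1 : Nat) <<< (n - i).toNat) ^^^ 1) <<< (i - j).toNat) ^^^ 1) <<< (j - k).toNat) ^^^ 1) <<< k.toNat) ^^^ 1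
    if pvAIsIrred (pvToBin thePoly) ≠ 0 then some (pvToBin thePoly)
    else pvAPenLoopK n i j rest

def pvAPenLoopJ (n i : Int) : List Int → Option (List Char)
  | [] => none
  | j :: rest =>
    match pvAPenLoopK n i j (PySem.List.pyRange 1 j 1) with
    | some s => some s
    | none => pvAPenLoopJ n i rest

def pvAPenLoopI (n : Int) : List Int → Option (List Char)
  | [] => none
  | i :: rest =>
    match pvAPenLoopJ n i (PySem.List.pyRange 2 i 1) with
    | some s => some s
    | none => pvAPenLoopI n rest

def genIrred (n : Int) : String :=
  match pvATriLoop n (PySem.List.pyRange 1 n 1) with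
  | some s => String.ofList s
  | none =>
    match pvAPenLoopI n (PySem.List.pyRange 3 n 1) with
    | some s => String.ofList s
    | none => "N/A"

-- ===== PORT B =====

-- a.bit_length()
def pvBlen (n : Nat) : Nat := PySem.Int.bitLength (n : Int)

-- _sq: the binary digits of a re-read in radix four (int(bin(a)[2:], 4))
def pvBSq (a : Nat) : Nat :=
  (PySem.Int.toBinChars (a : Int)).foldl (fun acc c => 4 * acc + (if c = '1' then 1 else 0)) 0

-- _rem's exponent-extraction while-loop (set bits of low(b), high to low); fuel low+1 suffices
def pvBExpsLoop : Nat → Nat → List Nat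
  | 0, _ => []
  | f + 1, low =>
    if low ≠ 0 then (pvBlen low - 1) :: pvBExpsLoop f (low ^^^ (1 <<< (pvBlen low - 1)))
    else []

-- _rem's folding while-loop (x^n = low(b)); fuel a+1 suffices (a strictly decreases)
def pvBRemLoop (n mask : Nat) (exps : List Nat) : Nat → Nat → Nat
  | 0, a => a
  | f + 1, a =>
    if n < pvBlen a then
      pvBRemLoop n mask exps f
        (exps.foldl (fun acc e => acc ^^^ ((a >>> n) <<< e)) (a &&& mask))
    else a

def pvBRem (a b : Nat) : Nat :=
  let n := pvBlen b - 1
  if pvBlen b ≤ 1 then 0       -- n <= 0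
  else pvBRemLoop n ((1 <<< n) - 1)
    (pvBExpsLoop ((b ^^^ (1 <<< n)) + 1) (b ^^^ (1 <<< n))) (a + 1) a

-- _gcd's while-loop: fuel a+b+1 suffices (the sum strictly decreases except for one
-- immediate terminal swap from a=0, proved in the lemma section)
def pvBGcdLoopF : Nat → Nat → Nat → Nat
  | 0, a, _ => a
  | f + 1, a, b =>
    if b ≠ 0 then
      if pvBlen a < pvBlen b then
        pvBGcdLoopF f (b ^^^ (a <<< (pvBlen b - pvBlen a))) a
      else
        pvBGcdLoopF f (a ^^^ (b <<< (pvBlen a - pvBlen b))) b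
    else a

def pvBGcdF (a b : Nat) : Nat := pvBGcdLoopF (a + b + 1) a b

-- _irred: first stage the Ben-Or iterates into a list, then check every gcd with all()
def pvBUs (p : Nat) : Nat → Nat → List Nat
  | 0, _ => []
  | k + 1, u =>
    let u' := pvBRem (pvBSq u) p
    u' :: pvBUs p k u'

def pvBIrred (p : Nat) : Bool :=
  (pvBUs p ((pvBlen p - 1) / 2) 2).all (fun u => pvBGcdF p (u ^^^ 2) == 1)

-- the materialised candidate list: trinomials then pentanomials, as bit masks
def pvBCands (n : Int) : List Nat :=
  ((PySem.List.pyRange 1 n 1).map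
      (fun i => (1 <<< n.toNat) ^^^ (1 <<< i.toNat) ^^^ 1))
  ++ ((PySem.List.pyRange 3 n 1).flatMap (fun i =>
        (PySem.List.pyRange 2 i 1).flatMap (fun j =>
          (PySem.List.pyRange 1 j 1).map (fun k =>
            (1 <<< n.toNat) ^^^ (1 <<< i.toNat) ^^^ (1 <<< j.toNat) ^^^ (1 <<< k.toNat) ^^^ 1))))

def genIrred_alt (n : Int) : String :=
  match (pvBCands n).find? pvBIrred with
  | some p => String.ofList (PySem.Int.toBinChars (p : Int))   -- format(p, 'b')
  | none => "N/A"

-- ===== PRECONDITION & SPEC =====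
def Spec_genIrred (n : Int) (out : String) : Prop := out = genIrred_alt n
instance (n : Int) (out : String) : Decidable (Spec_genIrred n out) := by unfold Spec_genIrred; infer_instance

-- ===== CLAIM (what is proved, stated in full; the proofs are below) =====
def Claim_equal_genIrred : Prop := ∀ (n : Int), Dom_genIrred n → Spec_genIrred n (genIrred n)

-- ===== LEMMAS AND PROOFS =====

-- ---- intermediate layer M: A's algorithms carried out on ints (proof-only) ----

def pvSpread : Nat → Nat
  | 0 => 0
  | n + 1 => 4 * pvSpread ((n + 1) / 2) + (n + 1) % 2
  decreasing_by exact Nat.div_lt_self (Nat.succ_pos n) (by norm_num)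

def pvMModLoop (b db : Nat) : Nat → Nat → Nat
  | 0, a => a
  | fuel + 1, a =>
    if db + 1 ≤ pvBlen a then
      pvMModLoop b db fuel (a ^^^ (b <<< (pvBlen a - 1 - db)))
    else a

def pvMMod (a b : Nat) : Nat :=
  let db := pvBlen b - 1
  if pvBlen b ≤ 1 then 0            -- db <= 0
  else pvMModLoop b db (a + 1) a

def pvMGcdLoop : Nat → Nat → Nat → Nat
  | 0, a, _ => a
  | fuel + 1, a, b => if b ≠ 0 then pvMGcdLoop fuel b (pvMMod a b) else a

def pvMGcd (a b : Nat) : Nat := pvMGcdLoop (b + 1) a b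

def pvMIsIrredLoop (p : Nat) : Nat → Nat → Bool
  | 0, _ => true
  | k + 1, u =>
    let u' := pvMMod (pvSpread u) p
    if pvMGcd p (u' ^^^ 2) ≠ 1 then false else pvMIsIrredLoop p k u'

def pvMIsIrred (p : Nat) : Bool :=
  pvMIsIrredLoop p ((pvBlen p - 1) / 2) 2

def pvMTriLoop (n : Int) : List Int → Option Nat
  | [] => none
  | i :: rest =>
    let poly : Nat := ((((1 : Nat) <<< (n - i).toNat) ^^^ 1) <<< i.toNat) ^^^ 1
    if pvMIsIrred poly then some poly else pvMTriLoop n rest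

def pvMPenLoopK (n i j : Int) : List Int → Option Nat
  | [] => none
  | k :: rest =>
    let poly : Nat :=
      ((((((((1 : Nat) <<< (n - i).toNat) ^^^ 1) <<< (i - j).toNat) ^^^ 1) <<< (j - k).toNat) ^^^ 1) <<< k.toNat) ^^^ 1
    if pvMIsIrred poly then some poly else pvMPenLoopK n i j rest

def pvMPenLoopJ (n i : Int) : List Int → Option Nat
  | [] => none
  | j :: rest =>
    match pvMPenLoopK n i j (PySem.List.pyRange 1 j 1) with
    | some p => some p
    | none => pvMPenLoopJ n i rest

def pvMPenLoopI (n : Int) : List Int → Option Nat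
  | [] => none
  | i :: rest =>
    match pvMPenLoopJ n i (PySem.List.pyRange 2 i 1) with
    | some p => some p
    | none => pvMPenLoopI n rest

def pvMSearch (n : Int) : Option Nat :=
  match pvMTriLoop n (PySem.List.pyRange 1 n 1) with
  | some p => some p
  | none => pvMPenLoopI n (PySem.List.pyRange 3 n 1)

-- ---- binary strings of nonnegative ints ----

def pvBinMSB : Nat → List Char
  | n =>
    if _ : n < 2 then [if n = 1 then '1' else '0']
    else pvBinMSB (n / 2) ++ [if n % 2 = 1 then '1' else '0']
  decreasing_by exact Nat.div_lt_self (by omega) (by norm_num)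

theorem tdc (fuel : Nat) : ∀ n ds, n < fuel → Nat.toDigitsCore 2 fuel n ds = pvBinMSB n ++ ds := by
  induction fuel with
  | zero => omega
  | succ fuel ih =>
    intro n ds h
    rw [Nat.toDigitsCore]
    by_cases h2 : n < 2
    · have : n / 2 = 0 := by omega
      simp only [this]
      rw [pvBinMSB]
      rw [dif_pos h2]
      interval_cases n <;> rfl
    · have hn0 : n / 2 ≠ 0 := by omega
      simp only [if_neg hn0]
      have hrec : pvBinMSB n = pvBinMSB (n / 2) ++ [if n % 2 = 1 then '1' else '0'] := by
        rw [pvBinMSB]; exact dif_neg h2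
      rw [ih (n/2) _ (by omega), hrec, List.append_assoc]
      congr 1
      have : n % 2 = 0 ∨ n % 2 = 1 := by omega
      rcases this with h1 | h1 <;> simp [h1, Nat.digitChar]

theorem pvBinMSB_eq_toBin (n : Nat) : PySem.Int.toBinChars (n : Int) = pvBinMSB n := by
  unfold PySem.Int.toBinChars
  rw [if_neg (by omega)]
  show Nat.toDigits 2 ((n : Int).toNat) = _
  rw [Int.toNat_natCast, Nat.toDigits, tdc (n+1) n [] (by omega), List.append_nil]

theorem pvBlen_halve {n : Nat} (h : 0 < n) : pvBlen n = pvBlen (n / 2) + 1 :=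
  PySem.Int.bitLength_natCast h

theorem pvBlen_zero : pvBlen 0 = 0 := by decide
theorem pvBlen_one : pvBlen 1 = 1 := by decide

theorem pvBlen_pos {n : Nat} (h : 0 < n) : 1 ≤ pvBlen n := by
  rw [pvBlen_halve h]; omega

theorem pvBinMSB_length (n : Nat) : (pvBinMSB n).length = if n = 0 then 1 else pvBlen n := by
  induction n using pvBinMSB.induct with
  | case1 _x n h =>
    rw [pvBinMSB, dif_pos h]
    have h' : _x < 2 := h
    interval_cases _x
    · simp
    · simp [pvBlen_one]
  | case2 _x n h ih =>
    rw [pvBinMSB, dif_neg h]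
    have h' : ¬ _x < 2 := h
    have hn : 0 < _x := by omega
    have h2 : _x / 2 ≠ 0 := by omega
    have ih' : (pvBinMSB (_x / 2)).length = if _x / 2 = 0 then 1 else pvBlen (_x / 2) := ih
    simp only [List.length_append, List.length_singleton, ih', if_neg h2, if_neg (by omega : ¬ _x = 0)]
    rw [pvBlen_halve hn]

theorem pvParseFold (n : Nat) :
    ∀ acc, List.foldl (fun a c => 2 * a + (if c = '1' then 1 else 0)) acc (pvBinMSB n)
      = acc * 2 ^ (pvBinMSB n).length + n := by
  induction n using pvBinMSB.induct with
  | case1 _x n h =>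
    intro acc
    rw [pvBinMSB, dif_pos h]
    have h' : _x < 2 := h
    interval_cases _x <;> simp <;> ring
  | case2 _x n h ih =>
    intro acc
    have h' : ¬ _x < 2 := h
    have hrec : pvBinMSB _x = pvBinMSB (_x / 2) ++ [if _x % 2 = 1 then '1' else '0'] := by
      rw [pvBinMSB]; exact dif_neg h'
    have ih' : ∀ acc, List.foldl (fun a c => 2 * a + (if c = '1' then 1 else 0)) acc (pvBinMSB (_x / 2))
        = acc * 2 ^ (pvBinMSB (_x / 2)).length + _x / 2 := ih
    rw [hrec, List.foldl_append, ih']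
    simp only [List.foldl_cons, List.foldl_nil, List.length_append, List.length_singleton]
    have hb : (if (if _x % 2 = 1 then '1' else '0') = '1' then (1:Nat) else 0) = _x % 2 := by
      rcases Nat.mod_two_eq_zero_or_one _x with h1 | h1 <;> simp [h1]
    rw [hb, pow_succ]
    have h2m : 2 * (_x / 2) + _x % 2 = _x := by omega
    have hsplit : 2 * (acc * 2 ^ (pvBinMSB (_x / 2)).length + _x / 2) + _x % 2
        = acc * (2 ^ (pvBinMSB (_x / 2)).length * 2) + (2 * (_x / 2) + _x % 2) := by ring
    rw [hsplit, h2m]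

theorem pvParse_toBin' (n : Nat) :
    List.foldl (fun a c => 2 * a + (if c = '1' then 1 else 0)) 0 (pvBinMSB n) = n := by
  rw [pvParseFold n 0]; ring

theorem pvBlen_two_mul {b : Nat} (hb : 0 < b) : pvBlen (2 * b) = pvBlen b + 1 := by
  have := pvBlen_halve (n := 2 * b) (by omega)
  simpa [Nat.mul_div_cancel_left b (by norm_num : 0 < 2)] using this

theorem pvBlen_shift (b s : Nat) (hb : 0 < b) : pvBlen (b <<< s) = pvBlen b + s := by
  rw [Nat.shiftLeft_eq]
  induction s with
  | zero => simp
  | succ s ih =>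
    have hpos : 0 < b * 2 ^ s := by positivity
    rw [pow_succ, show b * (2 ^ s * 2) = 2 * (b * 2 ^ s) by ring, pvBlen_two_mul hpos, ih]
    omega

theorem pvBlen_lt (n : Nat) : n < 2 ^ pvBlen n := by
  simpa using PySem.Int.lt_two_pow_bitLength (n : Int)

theorem pvBlen_le {n : Nat} (h : n ≠ 0) : 2 ^ (pvBlen n - 1) ≤ n := by
  simpa using PySem.Int.two_pow_bitLength_le (n : Int) (by exact_mod_cast h)

theorem pvMulPowXor (m B b : Nat) (hb : b < 2 ^ m) : (2 ^ m * B) ^^^ b = 2 ^ m * B + b := by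
  apply Nat.eq_of_testBit_eq
  intro j
  rw [Nat.testBit_xor, Nat.testBit_two_pow_mul_add B hb j,
    show 2 ^ m * B = B * 2 ^ m by ring, Nat.testBit_mul_two_pow]
  by_cases hj : j < m
  · simp [hj, Nat.not_le.mpr hj]
  · have hxj : b.testBit j = false :=
      Nat.testBit_lt_two_pow (lt_of_lt_of_le hb (Nat.pow_le_pow_right (by norm_num) (by omega)))
    simp [hj, hxj, Nat.le_of_not_lt hj]

theorem pvXor_top (a y : Nat) (ha : 0 < a) (h : pvBlen y = pvBlen a) :
    a ^^^ y < 2 ^ (pvBlen a - 1) := by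
  have hk := pvBlen_pos ha
  have hy : 0 < y := by
    rcases Nat.eq_zero_or_pos y with h0 | h0
    · exfalso; rw [h0, pvBlen_zero] at h; omega
    · exact h0
  have haeq : a = 2 ^ (pvBlen a - 1) ^^^ (a - 2 ^ (pvBlen a - 1)) := by
    rw [show (2:Nat) ^ (pvBlen a - 1) ^^^ (a - 2 ^ (pvBlen a - 1))
        = 2 ^ (pvBlen a - 1) * 1 ^^^ (a - 2 ^ (pvBlen a - 1)) by ring_nf]
    rw [pvMulPowXor]
    · have := pvBlen_le (Nat.pos_iff_ne_zero.mp ha); omega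
    · have h1 := pvBlen_le (Nat.pos_iff_ne_zero.mp ha)
      have h2 := pvBlen_lt a
      have h3 : pvBlen a = (pvBlen a - 1) + 1 := by omega
      rw [h3, pow_succ] at h2
      omega
  have hyeq : y = 2 ^ (pvBlen a - 1) ^^^ (y - 2 ^ (pvBlen a - 1)) := by
    rw [show (2:Nat) ^ (pvBlen a - 1) ^^^ (y - 2 ^ (pvBlen a - 1))
        = 2 ^ (pvBlen a - 1) * 1 ^^^ (y - 2 ^ (pvBlen a - 1)) by ring_nf]
    rw [pvMulPowXor]
    · have := pvBlen_le (Nat.pos_iff_ne_zero.mp hy); rw [h] at this; omega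
    · have h1 := pvBlen_le (Nat.pos_iff_ne_zero.mp hy)
      have h2 := pvBlen_lt y
      rw [h] at h1 h2
      have h3 : pvBlen a = (pvBlen a - 1) + 1 := by omega
      rw [h3, pow_succ] at h2
      omega
  have hswap : ∀ p u v : Nat, (p ^^^ u) ^^^ (p ^^^ v) = u ^^^ v := by
    intro p u v
    rw [Nat.xor_comm p u, Nat.xor_assoc, ← Nat.xor_assoc p p v, Nat.xor_self, Nat.zero_xor]
  have main : a ^^^ y = (a - 2 ^ (pvBlen a - 1)) ^^^ (y - 2 ^ (pvBlen a - 1)) := by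
    conv_lhs => rw [haeq, hyeq]
    exact hswap _ _ _
  rw [main]
  have h3 : pvBlen a = (pvBlen a - 1) + 1 := by omega
  have h2a := pvBlen_lt a
  have h2y := pvBlen_lt y
  rw [h] at h2y
  rw [h3, pow_succ] at h2a h2y
  exact Nat.xor_lt_two_pow (by omega) (by omega)

theorem pvToBin_msb (n : Nat) : pvToBin n = pvBinMSB n := pvBinMSB_eq_toBin n

theorem pvToBin_length (n : Nat) : (pvToBin n).length = if n = 0 then 1 else pvBlen n := by
  rw [pvToBin_msb]; exact pvBinMSB_length n

theorem pvParse_toBin (n : Nat) : pvParseBin (pvToBin n) = n := by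
  rw [pvToBin_msb]; exact pvParse_toBin' n

theorem pvToBin_eq_iff (a b : Nat) : pvToBin a = pvToBin b ↔ a = b := by
  constructor
  · intro h
    have := congrArg pvParseBin h
    simpa [pvParse_toBin] using this
  · rintro rfl; rfl

theorem pvModLoop_sim (b db : Nat) (hdb : 1 ≤ db) (hb : pvBlen b = db + 1) :
    ∀ a fa fb, a < fa → a < fb →
      pvAModLoop b db fa a ((pvToBin a).length - 1) = pvMModLoop b db fb a
      ∧ pvBlen (pvMModLoop b db fb a) ≤ db := by
  intro a
  induction a using Nat.strong_induction_on with
  | _ a ih =>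
    intro fa fb hfa hfb
    obtain ⟨fa', rfl⟩ : ∃ k, fa = k + 1 := ⟨fa - 1, by omega⟩
    obtain ⟨fb', rfl⟩ : ∃ k, fb = k + 1 := ⟨fb - 1, by omega⟩
    rw [pvAModLoop, pvMModLoop]
    by_cases hc : db + 1 ≤ pvBlen a
    · have ha0 : a ≠ 0 := by
        intro h0; rw [h0, pvBlen_zero] at hc; omega
      have hlen : (pvToBin a).length = pvBlen a := by rw [pvToBin_length, if_neg ha0]
      have hcondA : db ≤ (pvToBin a).length - 1 := by omega
      rw [if_pos hcondA, if_pos hc]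
      have hbpos : 0 < b := by
        rcases Nat.eq_zero_or_pos b with h0 | h0
        · rw [h0, pvBlen_zero] at hb; omega
        · exact h0
      have hba : pvBlen (b <<< ((pvToBin a).length - 1 - db)) = pvBlen a := by
        rw [hlen, pvBlen_shift b _ hbpos, hb]; omega
      have htop := pvXor_top a _ (Nat.pos_of_ne_zero ha0) hba
      have hlt : a ^^^ b <<< ((pvToBin a).length - 1 - db) < a :=
        lt_of_lt_of_le htop (pvBlen_le ha0)
      have hsh : (pvToBin a).length - 1 - db = pvBlen a - 1 - db := by rw [hlen]
      rw [hsh] at hlt ⊢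
      exact ih _ hlt fa' fb' (by omega) (by omega)
    · have hcondA : ¬ db ≤ (pvToBin a).length - 1 := by
        rw [pvToBin_length]
        by_cases h0 : a = 0
        · simp [h0]; omega
        · rw [if_neg h0]
          have := pvBlen_pos (Nat.pos_of_ne_zero h0)
          omega
      rw [if_neg hcondA, if_neg hc]
      exact ⟨rfl, by omega⟩

theorem pvMod_sim (a b : Nat) : pvAMod (pvToBin a) (pvToBin b) = pvToBin (pvMMod a b) := by
  unfold pvAMod pvMMod
  simp only [pvParse_toBin]
  by_cases hb : pvBlen b ≤ 1
  · have hdeg : (pvToBin b).length - 1 = 0 := by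
      rw [pvToBin_length]
      by_cases h0 : b = 0
      · simp [h0]
      · rw [if_neg h0]; omega
    simp [hdeg, hb]
  · have hb0 : b ≠ 0 := by
      intro h0; rw [h0, pvBlen_zero] at hb; omega
    have hk := pvBlen_pos (Nat.pos_of_ne_zero hb0)
    have hdeg : (pvToBin b).length - 1 = pvBlen b - 1 := by
      rw [pvToBin_length, if_neg hb0]
    rw [hdeg]
    rw [if_pos (by omega : pvBlen b - 1 ≠ 0), if_neg hb]
    exact congrArg pvToBin
      (pvModLoop_sim b (pvBlen b - 1) (by omega) (by omega) a (a + 1) (a + 1)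
        (by omega) (by omega)).1

theorem pvMMod_blen (a b : Nat) (hb : 2 ≤ pvBlen b) : pvBlen (pvMMod a b) ≤ pvBlen b - 1 := by
  unfold pvMMod
  rw [if_neg (by omega : ¬ pvBlen b ≤ 1)]
  exact (pvModLoop_sim b (pvBlen b - 1) (by omega) (by omega) a (a + 1) (a + 1)
    (by omega) (by omega)).2

theorem pvMMod_lt (a b : Nat) (hb : 1 ≤ b) : pvMMod a b < b := by
  by_cases h1 : pvBlen b ≤ 1
  · unfold pvMMod
    rw [if_pos h1]; omega
  · calc pvMMod a b < 2 ^ pvBlen (pvMMod a b) := pvBlen_lt _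
      _ ≤ 2 ^ (pvBlen b - 1) := Nat.pow_le_pow_right (by norm_num) (pvMMod_blen a b (by omega))
      _ ≤ b := pvBlen_le (by omega : b ≠ 0)

theorem pvSqStep (B b : Nat) (hb : b < 4) : (B <<< 2) ^^^ b = 4 * B + b := by
  rw [Nat.shiftLeft_eq, show B * 2 ^ 2 = 2 ^ 2 * B by ring, pvMulPowXor 2 B b (by omega)]
  ring

theorem pvSqFold (n : Nat) :
    ∀ acc, List.foldl (fun B c => (B <<< 2) ^^^ (if c = '1' then 1 else 0)) acc (pvBinMSB n)
      = acc * 4 ^ (pvBinMSB n).length + pvSpread n := by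
  induction n using pvBinMSB.induct with
  | case1 _x n h =>
    intro acc
    rw [pvBinMSB, dif_pos h]
    have h' : _x < 2 := h
    interval_cases _x
    · simp only [List.foldl_cons, List.foldl_nil, List.length_singleton]
      norm_num
      rw [if_neg (by decide : ¬ ('0':Char) = '1'), pvSqStep acc 0 (by norm_num),
        show pvSpread 0 = 0 from by rw [pvSpread]]
      ring
    · simp only [List.foldl_cons, List.foldl_nil, List.length_singleton]
      norm_num
      rw [pvSqStep acc 1 (by norm_num), show pvSpread 1 = 1 from by norm_num [pvSpread]]
      ring
  | case2 _x n h ih =>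
    intro acc
    have h' : ¬ _x < 2 := h
    have ih' : ∀ acc, List.foldl (fun B c => (B <<< 2) ^^^ (if c = '1' then 1 else 0)) acc (pvBinMSB (_x / 2))
        = acc * 4 ^ (pvBinMSB (_x / 2)).length + pvSpread (_x / 2) := ih
    have hrec : pvBinMSB _x = pvBinMSB (_x / 2) ++ [if _x % 2 = 1 then '1' else '0'] := by
      rw [pvBinMSB]; exact dif_neg h'
    rw [hrec, List.foldl_append, ih']
    simp only [List.foldl_cons, List.foldl_nil, List.length_append, List.length_singleton]
    have hb : (if (if _x % 2 = 1 then '1' else '0') = '1' then (1:Nat) else 0) = _x % 2 := by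
      rcases Nat.mod_two_eq_zero_or_one _x with h1 | h1 <;> simp [h1]
    rw [hb, pvSqStep _ _ (by omega), pow_succ]
    obtain ⟨m, rfl⟩ : ∃ m, _x = m + 1 := ⟨_x - 1, by omega⟩
    rw [show pvSpread (m + 1) = 4 * pvSpread ((m + 1) / 2) + (m + 1) % 2 from by rw [pvSpread]]
    ring

theorem pvBSq_eq (a : Nat) : pvBSq a = pvSpread a := by
  unfold pvBSq
  rw [show PySem.Int.toBinChars ((a : Nat) : Int) = pvBinMSB a from pvBinMSB_eq_toBin a]
  have hf : (fun (B : Nat) (c : Char) => 4 * B + (if c = '1' then 1 else 0))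
      = (fun (B : Nat) (c : Char) => (B <<< 2) ^^^ (if c = '1' then 1 else 0)) := by
    funext B c
    exact (pvSqStep B _ (by split_ifs <;> norm_num)).symm
  rw [hf, pvSqFold a 0]
  simp

theorem pvBinMSB_zero : pvBinMSB 0 = ['0'] := by rw [pvBinMSB]; simp

theorem pvBinMSB_head : ∀ n : Nat, 0 < n → ∃ t, pvBinMSB n = '1' :: t := by
  intro n
  induction n using pvBinMSB.induct with
  | case1 _x n h =>
    intro hn
    have h' : _x < 2 := h
    have hx : _x = 1 := by omega
    subst hx
    exact ⟨[], by rw [pvBinMSB]; simp⟩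
  | case2 _x n h ih =>
    intro hn
    have h' : ¬ _x < 2 := h
    obtain ⟨t, ht⟩ := ih (show 0 < _x / 2 by omega)
    refine ⟨t ++ [if _x % 2 = 1 then '1' else '0'], ?_⟩
    rw [pvBinMSB, dif_neg h', ht]
    simp

theorem pvSquare_sim (u : Nat) : pvASquare (pvToBin u) = pvToBin (pvSpread u) := by
  rw [pvToBin_msb u]
  rcases Nat.eq_zero_or_pos u with rfl | hu
  · rw [pvBinMSB_zero]
    unfold pvASquare
    rw [show pvSpread 0 = 0 from by rw [pvSpread]]
    rfl
  · obtain ⟨t, ht⟩ := pvBinMSB_head u hu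
    rw [ht]
    unfold pvASquare
    simp only [List.drop_one, List.tail_cons]
    have hstep : List.foldl (fun B c => (B <<< 2) ^^^ (if c = '1' then 1 else 0)) 1 t
        = List.foldl (fun B c => (B <<< 2) ^^^ (if c = '1' then 1 else 0)) 0 ('1' :: t) := by
      simp
    rw [hstep, ← ht, pvSqFold u 0]
    simp

theorem pvToBin_zero : pvToBin 0 = ['0'] := by decide
theorem pvToBin_one : pvToBin 1 = ['1'] := by decide
theorem pvToBin_two : pvToBin 2 = ['1', '0'] := by decide

theorem pvToBin_ne_zero_iff (b : Nat) : (pvToBin b ≠ ['0']) ↔ b ≠ 0 := by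
  rw [← pvToBin_zero, not_iff_not, pvToBin_eq_iff]

theorem pvEuclidLoop_sim : ∀ b : Nat, ∀ a fa fb, b < fa → b < fb →
    pvAEuclidLoop fa (pvToBin a) (pvToBin b) (pvToBin b) = pvToBin (pvMGcdLoop fb a b) := by
  intro b
  induction b using Nat.strong_induction_on with
  | _ b ih =>
    intro a fa fb hfa hfb
    obtain ⟨fa', rfl⟩ : ∃ k, fa = k + 1 := ⟨fa - 1, by omega⟩
    obtain ⟨fb', rfl⟩ : ∃ k, fb = k + 1 := ⟨fb - 1, by omega⟩
    rw [pvAEuclidLoop, pvMGcdLoop]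
    by_cases hb : b = 0
    · subst hb
      rw [if_neg (by simp [pvToBin_ne_zero_iff]), if_neg (by simp)]
    · rw [if_pos (by simpa [pvToBin_ne_zero_iff] using hb), if_pos hb]
      have hm := pvMMod_lt a b (by omega)
      simp only [pvMod_sim]
      exact ih (pvMMod a b) hm b fa' fb' (by omega) (by omega)

theorem pvEuclid_sim (b a : Nat) : pvAEuclid (pvToBin a) (pvToBin b) = pvToBin (pvMGcd a b) := by
  unfold pvAEuclid pvMGcd
  rw [pvParse_toBin]
  exact pvEuclidLoop_sim b a (b + 1) (b + 1) (by omega) (by omega)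

theorem pvAdd_sim (a b : Nat) : pvAAdd (pvToBin a) (pvToBin b) = pvToBin (a ^^^ b) := by
  unfold pvAAdd
  rw [pvParse_toBin, pvParse_toBin]

theorem pvToBin_ne_one_iff (b : Nat) : (pvToBin b ≠ ['1']) ↔ b ≠ 1 := by
  rw [← pvToBin_one, not_iff_not, pvToBin_eq_iff]

theorem pvIsIrredLoop_sim (p : Nat) :
    ∀ k u, pvAIsIrredLoop (pvToBin p) k (pvToBin u) = if pvMIsIrredLoop p k u then 1 else 0 := by
  intro k
  induction k with
  | zero => intro u; rw [pvAIsIrredLoop, pvMIsIrredLoop]; simp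
  | succ k ih =>
    intro u
    rw [pvAIsIrredLoop, pvMIsIrredLoop]
    simp only [pvSquare_sim, pvMod_sim, ← pvToBin_two, pvAdd_sim, pvEuclid_sim]
    by_cases hd : pvMGcd p (pvMMod (pvSpread u) p ^^^ 2) = 1
    · rw [if_neg (show ¬ pvToBin (pvMGcd p (pvMMod (pvSpread u) p ^^^ 2)) ≠ ['1'] by
          simp [pvToBin_ne_one_iff, hd]),
        if_neg (show ¬ pvMGcd p (pvMMod (pvSpread u) p ^^^ 2) ≠ 1 by simp [hd])]
      exact ih _
    · rw [if_pos (show pvToBin (pvMGcd p (pvMMod (pvSpread u) p ^^^ 2)) ≠ ['1'] by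
          simp [pvToBin_ne_one_iff, hd]),
        if_pos hd]
      simp

theorem pvIsIrred_sim (p : Nat) : pvAIsIrred (pvToBin p) = if pvMIsIrred p then 1 else 0 := by
  unfold pvAIsIrred pvMIsIrred
  have hdeg : (pvToBin p).length - 1 = pvBlen p - 1 := by
    rw [pvToBin_length]
    by_cases h0 : p = 0
    · simp [h0, pvBlen_zero]
    · rw [if_neg h0]
  rw [hdeg, ← pvToBin_two]
  exact pvIsIrredLoop_sim p ((pvBlen p - 1) / 2) 2

theorem pvIrr_cond (q : Nat) : (pvAIsIrred (pvToBin q) ≠ 0) ↔ pvMIsIrred q = true := by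
  rw [pvIsIrred_sim]
  by_cases h : pvMIsIrred q <;> simp [h]

theorem pvTri_sim (n : Int) (l : List Int) :
    pvATriLoop n l = (pvMTriLoop n l).map pvToBin := by
  induction l with
  | nil => rfl
  | cons i rest ih =>
    rw [pvATriLoop, pvMTriLoop]
    by_cases hirr : pvMIsIrred (((1 <<< (n - i).toNat ^^^ 1) <<< i.toNat) ^^^ 1) = true
    · rw [if_pos ((pvIrr_cond _).mpr hirr), if_pos hirr]; rfl
    · rw [if_neg (by simpa [pvIrr_cond] using hirr), if_neg hirr, ih]

theorem pvPenK_sim (n i j : Int) (l : List Int) :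
    pvAPenLoopK n i j l = (pvMPenLoopK n i j l).map pvToBin := by
  induction l with
  | nil => rfl
  | cons k rest ih =>
    rw [pvAPenLoopK, pvMPenLoopK]
    by_cases hirr : pvMIsIrred
        (((((((1 <<< (n - i).toNat ^^^ 1) <<< (i - j).toNat) ^^^ 1) <<< (j - k).toNat) ^^^ 1) <<< k.toNat) ^^^ 1) = true
    · rw [if_pos ((pvIrr_cond _).mpr hirr), if_pos hirr]; rfl
    · rw [if_neg (by simpa [pvIrr_cond] using hirr), if_neg hirr, ih]

theorem pvPenJ_sim (n i : Int) (l : List Int) :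
    pvAPenLoopJ n i l = (pvMPenLoopJ n i l).map pvToBin := by
  induction l with
  | nil => rfl
  | cons j rest ih =>
    rw [pvAPenLoopJ, pvMPenLoopJ, pvPenK_sim]
    cases pvMPenLoopK n i j (PySem.List.pyRange 1 j 1) with
    | some p => rfl
    | none => simpa using ih

theorem pvPen_sim (n : Int) (l : List Int) :
    pvAPenLoopI n l = (pvMPenLoopI n l).map pvToBin := by
  induction l with
  | nil => rfl
  | cons i rest ih =>
    rw [pvAPenLoopI, pvMPenLoopI, pvPenJ_sim]
    cases pvMPenLoopJ n i (PySem.List.pyRange 2 i 1) with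
    | some p => rfl
    | none => simpa using ih

-- ---- carry-less multiples: remainder uniqueness in GF(2)[x] ----

def pvClmul : Nat → Nat → Nat
  | 0, _ => 0
  | q + 1, b => (pvClmul ((q + 1) / 2) b) <<< 1 ^^^ (if (q + 1) % 2 = 1 then b else 0)
  termination_by q _ => q
  decreasing_by exact Nat.div_lt_self (Nat.succ_pos q) (by norm_num)

theorem pvClmul_zero (b : Nat) : pvClmul 0 b = 0 := by rw [pvClmul]

theorem pvClmul_eq (q b : Nat) :
    pvClmul q b = if q = 0 then 0
      else (pvClmul (q / 2) b) <<< 1 ^^^ (if q % 2 = 1 then b else 0) := by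
  match q with
  | 0 => rw [pvClmul_zero]; simp
  | q + 1 => rw [pvClmul]; simp

theorem pvXor_shl (x y s : Nat) : (x ^^^ y) <<< s = (x <<< s) ^^^ (y <<< s) := by
  apply Nat.eq_of_testBit_eq
  intro j
  simp only [Nat.testBit_shiftLeft, Nat.testBit_xor]
  by_cases h : s ≤ j <;> simp [h]

theorem pvShl_shl (x a b : Nat) : (x <<< a) <<< b = x <<< (a + b) := by
  simp [Nat.shiftLeft_eq, pow_add, mul_assoc]

theorem pvXor_div_two (x y : Nat) : (x ^^^ y) / 2 = x / 2 ^^^ y / 2 := by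
  apply Nat.eq_of_testBit_eq
  intro j
  simp [Nat.testBit_div_two, Nat.testBit_xor]

theorem pvXor_mod_two (x y : Nat) : (x ^^^ y) % 2 = x % 2 ^^^ y % 2 := by
  rw [← Nat.and_one_is_mod, ← Nat.and_one_is_mod, ← Nat.and_one_is_mod,
    Nat.and_xor_distrib_right]

theorem pvXor_swap (a b c d : Nat) : (a ^^^ b) ^^^ (c ^^^ d) = (a ^^^ c) ^^^ (b ^^^ d) := by
  rw [Nat.xor_assoc, Nat.xor_assoc]
  congr 1
  rw [← Nat.xor_assoc b c d, Nat.xor_comm b c, Nat.xor_assoc c b d]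

theorem pvXor_cancel_mid (a b c : Nat) : (a ^^^ b) ^^^ (b ^^^ c) = a ^^^ c := by
  rw [Nat.xor_assoc, ← Nat.xor_assoc b b c, Nat.xor_self, Nat.zero_xor]

theorem pvClmul_xor (b : Nat) : ∀ q1 q2, pvClmul (q1 ^^^ q2) b = pvClmul q1 b ^^^ pvClmul q2 b := by
  intro q1
  induction q1 using Nat.strong_induction_on with
  | _ q1 ih =>
    intro q2
    by_cases h1 : q1 = 0
    · simp [h1, pvClmul_zero]
    by_cases h2 : q2 = 0
    · simp [h2, pvClmul_zero]
    by_cases h12 : q1 = q2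
    · subst h12
      simp [pvClmul_zero]
    have hne : q1 ^^^ q2 ≠ 0 := fun h => h12 (Nat.xor_eq_zero_iff.mp h)
    rw [pvClmul_eq (q1 ^^^ q2), if_neg hne, pvClmul_eq q1, if_neg h1, pvClmul_eq q2, if_neg h2,
      pvXor_div_two, ih (q1 / 2) (Nat.div_lt_self (Nat.pos_of_ne_zero h1) one_lt_two) (q2 / 2),
      pvXor_shl]
    have hbit : (if (q1 ^^^ q2) % 2 = 1 then b else 0)
        = (if q1 % 2 = 1 then b else 0) ^^^ (if q2 % 2 = 1 then b else 0) := by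
      rw [pvXor_mod_two]
      rcases Nat.mod_two_eq_zero_or_one q1 with h | h <;>
        rcases Nat.mod_two_eq_zero_or_one q2 with h' | h' <;> simp [h, h']
    rw [hbit, pvXor_swap]

theorem pvClmul_one (b : Nat) : pvClmul 1 b = b := by
  rw [pvClmul]
  simp [pvClmul]

theorem pvClmul_two_mul (q b : Nat) : pvClmul (2 * q) b = (pvClmul q b) <<< 1 := by
  by_cases h : q = 0
  · simp [h, pvClmul_zero]
  · rw [pvClmul_eq (2 * q), if_neg (by omega)]
    have e1 : 2 * q / 2 = q := by omega
    have e2 : ¬ 2 * q % 2 = 1 := by omega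
    rw [e1, if_neg e2, Nat.xor_zero]

theorem pvClmul_pow (b : Nat) : ∀ s, pvClmul (1 <<< s) b = b <<< s := by
  intro s
  induction s with
  | zero => simpa using pvClmul_one b
  | succ s ih =>
    have e : (1 : Nat) <<< (s + 1) = 2 * (1 <<< s) := by
      rw [Nat.shiftLeft_eq, Nat.shiftLeft_eq, pow_succ]; ring
    rw [e, pvClmul_two_mul, ih, pvShl_shl]

def pvIsM (b m : Nat) : Prop := ∃ q, m = pvClmul q b

theorem pvIsM_zero (b : Nat) : pvIsM b 0 := ⟨0, (pvClmul_zero b).symm⟩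

theorem pvIsM_xor {b x y : Nat} (hx : pvIsM b x) (hy : pvIsM b y) : pvIsM b (x ^^^ y) := by
  obtain ⟨q1, rfl⟩ := hx
  obtain ⟨q2, rfl⟩ := hy
  exact ⟨q1 ^^^ q2, (pvClmul_xor b q1 q2).symm⟩

theorem pvIsM_shl (b s : Nat) : pvIsM b (b <<< s) := ⟨1 <<< s, (pvClmul_pow b s).symm⟩

theorem pvBlen_le_iff {m k : Nat} : pvBlen m ≤ k ↔ m < 2 ^ k := by
  constructor
  · intro h
    exact lt_of_lt_of_le (pvBlen_lt m) (Nat.pow_le_pow_right (by norm_num) h)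
  · intro h
    by_contra hc
    push_neg at hc
    have hm : m ≠ 0 := by
      intro h0; rw [h0, pvBlen_zero] at hc; omega
    have h1 := pvBlen_le hm
    have h2 : (2:Nat) ^ k ≤ 2 ^ (pvBlen m - 1) := Nat.pow_le_pow_right (by norm_num) (by omega)
    omega

theorem pvBlen_eq_of_bounds {z k : Nat} (h1 : 2 ^ k ≤ z) (h2 : z < 2 ^ (k + 1)) :
    pvBlen z = k + 1 := by
  have ha : pvBlen z ≤ k + 1 := pvBlen_le_iff.mpr h2
  have hb : ¬ pvBlen z ≤ k := fun h => absurd (pvBlen_le_iff.mp h) (by omega)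
  omega

theorem pvTestBit_top {x : Nat} (hx : x ≠ 0) : x.testBit (pvBlen x - 1) = true := by
  have h1 := pvBlen_le hx
  have h2 := pvBlen_lt x
  have hkk : pvBlen x = (pvBlen x - 1) + 1 := by
    have := pvBlen_pos (Nat.pos_of_ne_zero hx); omega
  have hlt : x - 2 ^ (pvBlen x - 1) < 2 ^ (pvBlen x - 1) := by
    rw [hkk, pow_succ] at h2; omega
  have hxk : x = 2 ^ (pvBlen x - 1) * 1 + (x - 2 ^ (pvBlen x - 1)) := by omega
  have ht := Nat.testBit_two_pow_mul_add 1 hlt (pvBlen x - 1)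
  rw [← hxk] at ht
  rw [ht]
  simp

theorem pvBlen_xor_dom {x y : Nat} (h : pvBlen y < pvBlen x) : pvBlen (x ^^^ y) = pvBlen x := by
  have hx : x ≠ 0 := by
    intro h0; rw [h0, pvBlen_zero] at h; omega
  have hk : pvBlen x = (pvBlen x - 1) + 1 := by
    have := pvBlen_pos (Nat.pos_of_ne_zero hx); omega
  rw [hk]
  apply pvBlen_eq_of_bounds
  · have hyb : y.testBit (pvBlen x - 1) = false :=
      Nat.testBit_lt_two_pow
        (lt_of_lt_of_le (pvBlen_lt y) (Nat.pow_le_pow_right (by norm_num) (by omega)))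
    have htb : (x ^^^ y).testBit (pvBlen x - 1) = true := by
      rw [Nat.testBit_xor, pvTestBit_top hx, hyb]; rfl
    by_contra hlt
    push_neg at hlt
    rw [Nat.testBit_lt_two_pow hlt] at htb
    exact Bool.false_ne_true htb
  · have hxl : x < 2 ^ ((pvBlen x - 1) + 1) := by rw [← hk]; exact pvBlen_lt x
    have hyl : y < 2 ^ ((pvBlen x - 1) + 1) :=
      lt_of_lt_of_le (pvBlen_lt y) (Nat.pow_le_pow_right (by norm_num) (by omega))
    exact Nat.xor_lt_two_pow hxl hyl

theorem pvClmul_blen {b : Nat} (hb : b ≠ 0) : ∀ q, q ≠ 0 → pvBlen (pvClmul q b) = pvBlen q + pvBlen b - 1 := by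
  intro q
  induction q using Nat.strong_induction_on with
  | _ q ih =>
    intro hq
    by_cases h1 : q = 1
    · subst h1
      rw [pvClmul_one, pvBlen_one]
      omega
    · have hq2 : 2 ≤ q := by omega
      have hq2' : q / 2 ≠ 0 := by omega
      have hql : pvBlen q = pvBlen (q / 2) + 1 := pvBlen_halve (by omega)
      have ihq := ih (q / 2) (by omega) hq2'
      have hbp := pvBlen_pos (Nat.pos_of_ne_zero hb)
      have hqp := pvBlen_pos (Nat.pos_of_ne_zero hq2')
      have hc0 : pvClmul (q / 2) b ≠ 0 := by
        intro h0; rw [h0, pvBlen_zero] at ihq; omega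
      have hshift : pvBlen ((pvClmul (q / 2) b) <<< 1) = pvBlen (pvClmul (q / 2) b) + 1 :=
        pvBlen_shift _ 1 (Nat.pos_of_ne_zero hc0)
      rw [pvClmul_eq q, if_neg hq]
      by_cases hpar : q % 2 = 1
      · rw [if_pos hpar]
        have hdom : pvBlen b < pvBlen ((pvClmul (q / 2) b) <<< 1) := by
          rw [hshift, ihq]; omega
        rw [pvBlen_xor_dom hdom, hshift, ihq]
        omega
      · rw [if_neg hpar, Nat.xor_zero, hshift, ihq]
        omega

theorem pvRemUnique {b r1 r2 : Nat} (hb : 2 ≤ pvBlen b)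
    (h1 : pvBlen r1 < pvBlen b) (h2 : pvBlen r2 < pvBlen b)
    (hm : pvIsM b (r1 ^^^ r2)) : r1 = r2 := by
  obtain ⟨q, hq⟩ := hm
  by_cases hq0 : q = 0
  · rw [hq0] at hq
    exact Nat.xor_eq_zero_iff.mp (by simpa [pvClmul_zero] using hq)
  · exfalso
    have hbne : b ≠ 0 := by intro h0; rw [h0, pvBlen_zero] at hb; omega
    have hbl := pvClmul_blen hbne q hq0
    rw [← hq] at hbl
    have hqp := pvBlen_pos (Nat.pos_of_ne_zero hq0)
    have hx1 : r1 < 2 ^ (pvBlen b - 1) := pvBlen_le_iff.mp (by omega)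
    have hx2 : r2 < 2 ^ (pvBlen b - 1) := pvBlen_le_iff.mp (by omega)
    have hup : pvBlen (r1 ^^^ r2) ≤ pvBlen b - 1 :=
      pvBlen_le_iff.mpr (Nat.xor_lt_two_pow hx1 hx2)
    omega

theorem pvMModLoop_isM (b db : Nat) : ∀ fuel a, pvIsM b (a ^^^ pvMModLoop b db fuel a) := by
  intro fuel
  induction fuel with
  | zero =>
    intro a
    rw [pvMModLoop]
    simpa using pvIsM_zero b
  | succ fuel ih =>
    intro a
    rw [pvMModLoop]
    split_ifs with hc
    · have h1 := ih (a ^^^ b <<< (pvBlen a - 1 - db))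
      have h2 : pvIsM b (a ^^^ (a ^^^ b <<< (pvBlen a - 1 - db))) := by
        rw [← Nat.xor_assoc, Nat.xor_self, Nat.zero_xor]
        exact pvIsM_shl b _
      have := pvIsM_xor h2 h1
      rwa [pvXor_cancel_mid] at this
    · simpa using pvIsM_zero b

theorem pvMMod_isM (a b : Nat) (hb : 2 ≤ pvBlen b) : pvIsM b (a ^^^ pvMMod a b) := by
  unfold pvMMod
  rw [if_neg (by omega : ¬ pvBlen b ≤ 1)]
  exact pvMModLoop_isM b _ (a + 1) a

theorem pvClmul_zero_right : ∀ q, pvClmul q 0 = 0 := by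
  intro q
  induction q using Nat.strong_induction_on with
  | _ q ih =>
    rw [pvClmul_eq]
    by_cases h : q = 0
    · simp [h]
    · rw [if_neg h, ih (q / 2) (Nat.div_lt_self (Nat.pos_of_ne_zero h) one_lt_two)]
      simp

theorem pvClmul_one_right : ∀ q, pvClmul q 1 = q := by
  intro q
  induction q using Nat.strong_induction_on with
  | _ q ih =>
    rw [pvClmul_eq]
    by_cases h : q = 0
    · simp [h]
    · rw [if_neg h, ih (q / 2) (Nat.div_lt_self (Nat.pos_of_ne_zero h) one_lt_two)]
      have e1 : (q / 2) <<< 1 = 2 * (q / 2) := by rw [Nat.shiftLeft_eq]; ring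
      have e2 : (if q % 2 = 1 then 1 else 0) = q % 2 := by
        rcases Nat.mod_two_eq_zero_or_one q with h' | h' <;> simp [h']
      rw [e1, e2]
      have e3 := pvMulPowXor 1 (q / 2) (q % 2) (by omega)
      simp only [pow_one] at e3
      rw [e3]
      omega

theorem pvClmul_xor_right : ∀ q b1 b2, pvClmul q (b1 ^^^ b2) = pvClmul q b1 ^^^ pvClmul q b2 := by
  intro q
  induction q using Nat.strong_induction_on with
  | _ q ih =>
    intro b1 b2
    by_cases h : q = 0
    · simp [h, pvClmul_zero]
    · rw [pvClmul_eq q (b1 ^^^ b2), pvClmul_eq q b1, pvClmul_eq q b2, if_neg h, if_neg h,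
        if_neg h, ih (q / 2) (Nat.div_lt_self (Nat.pos_of_ne_zero h) one_lt_two), pvXor_shl]
      by_cases hp : q % 2 = 1
      · rw [if_pos hp, if_pos hp, if_pos hp, pvXor_swap]
      · rw [if_neg hp, if_neg hp, if_neg hp]
        simp

theorem pvClmul_two_mul_right : ∀ b x, pvClmul b (2 * x) = (pvClmul b x) <<< 1 := by
  intro b
  induction b using Nat.strong_induction_on with
  | _ b ih =>
    intro x
    by_cases h : b = 0
    · simp [h, pvClmul_zero]
    · rw [pvClmul_eq b (2 * x), pvClmul_eq b x, if_neg h, if_neg h,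
        ih (b / 2) (Nat.div_lt_self (Nat.pos_of_ne_zero h) one_lt_two), pvXor_shl]
      congr 1
      by_cases hp : b % 2 = 1
      · rw [if_pos hp, if_pos hp, Nat.shiftLeft_eq, pow_one, Nat.mul_comm]
      · rw [if_neg hp, if_neg hp, Nat.zero_shiftLeft]

theorem pvClmul_comm : ∀ a b, pvClmul a b = pvClmul b a := by
  intro a
  induction a using Nat.strong_induction_on with
  | _ a ih =>
    intro b
    by_cases h : a = 0
    · rw [h, pvClmul_zero, pvClmul_zero_right]
    · have hdecomp : 2 * (a / 2) ^^^ a % 2 = a := by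
        have e := pvMulPowXor 1 (a / 2) (a % 2) (by omega)
        simp only [pow_one] at e
        rw [e]; omega
      have hbit : pvClmul (a % 2) b = pvClmul b (a % 2) := by
        rcases Nat.mod_two_eq_zero_or_one a with hp | hp
        · rw [hp, pvClmul_zero, pvClmul_zero_right]
        · rw [hp, pvClmul_one, pvClmul_one_right]
      calc pvClmul a b = pvClmul (2 * (a / 2) ^^^ a % 2) b := by rw [hdecomp]
        _ = pvClmul (2 * (a / 2)) b ^^^ pvClmul (a % 2) b := pvClmul_xor b _ _
        _ = (pvClmul (a / 2) b) <<< 1 ^^^ pvClmul (a % 2) b := by rw [pvClmul_two_mul]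
        _ = (pvClmul b (a / 2)) <<< 1 ^^^ pvClmul b (a % 2) := by
              rw [ih (a / 2) (Nat.div_lt_self (Nat.pos_of_ne_zero h) one_lt_two), hbit]
        _ = pvClmul b (2 * (a / 2)) ^^^ pvClmul b (a % 2) := by rw [pvClmul_two_mul_right]
        _ = pvClmul b (2 * (a / 2) ^^^ a % 2) := (pvClmul_xor_right b _ _).symm
        _ = pvClmul b a := by rw [hdecomp]

theorem pvTop_clear_lt {x : Nat} (hx : x ≠ 0) : x ^^^ (1 <<< (pvBlen x - 1)) < x := by
  have hb : pvBlen (1 <<< (pvBlen x - 1)) = pvBlen x := by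
    rw [pvBlen_shift 1 _ (by norm_num), pvBlen_one]
    have := pvBlen_pos (Nat.pos_of_ne_zero hx); omega
  exact lt_of_lt_of_le (pvXor_top x _ (Nat.pos_of_ne_zero hx) hb) (pvBlen_le hx)

theorem pvBExps_fold (h : Nat) : ∀ low f x, low < f →
    (pvBExpsLoop f low).foldl (fun acc e => acc ^^^ (h <<< e)) x = x ^^^ pvClmul low h := by
  intro low
  induction low using Nat.strong_induction_on with
  | _ low ih =>
    intro f x hf
    obtain ⟨f', rfl⟩ : ∃ k, f = k + 1 := ⟨f - 1, by omega⟩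
    rw [pvBExpsLoop]
    by_cases h0 : low = 0
    · rw [if_neg (by simp [h0])]
      rw [h0, pvClmul_zero]
      simp
    · rw [if_pos h0, List.foldl_cons]
      have hlt := pvTop_clear_lt h0
      rw [ih _ hlt f' _ (by omega)]
      have hsplit : (1 <<< (pvBlen low - 1)) ^^^ (low ^^^ (1 <<< (pvBlen low - 1))) = low := by
        rw [Nat.xor_comm low, ← Nat.xor_assoc, Nat.xor_self, Nat.zero_xor]
      have hdec : pvClmul low h
          = (h <<< (pvBlen low - 1)) ^^^ pvClmul (low ^^^ (1 <<< (pvBlen low - 1))) h := by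
        conv_lhs => rw [← hsplit]
        rw [pvClmul_xor, pvClmul_pow]
      rw [hdec, Nat.xor_assoc]

theorem pvAnd_mask (a n : Nat) : a &&& ((1 <<< n) - 1) = a ^^^ ((a >>> n) <<< n) := by
  apply Nat.eq_of_testBit_eq
  intro j
  rw [Nat.one_shiftLeft]
  simp only [Nat.testBit_and, Nat.testBit_two_pow_sub_one, Nat.testBit_xor,
    Nat.testBit_shiftLeft, Nat.testBit_shiftRight]
  by_cases hj : j < n
  · simp [hj, Nat.not_le.mpr hj]
  · have hnj : n ≤ j := Nat.le_of_not_lt hj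
    have : n + (j - n) = j := by omega
    simp [hj, hnj, this]

theorem pvBlen_shiftRight {a n : Nat} (h : n < pvBlen a) : pvBlen (a >>> n) = pvBlen a - n := by
  have ha : a ≠ 0 := by intro h0; rw [h0, pvBlen_zero] at h; omega
  have hk : pvBlen a - n = (pvBlen a - n - 1) + 1 := by omega
  rw [Nat.shiftRight_eq_div_pow, hk]
  apply pvBlen_eq_of_bounds
  · rw [Nat.le_div_iff_mul_le (Nat.two_pow_pos n)]
    calc 2 ^ (pvBlen a - n - 1) * 2 ^ n = 2 ^ (pvBlen a - 1) := by
          rw [← pow_add]; congr 1; omega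
      _ ≤ a := pvBlen_le ha
  · rw [Nat.div_lt_iff_lt_mul (Nat.two_pow_pos n)]
    calc a < 2 ^ pvBlen a := pvBlen_lt a
      _ = 2 ^ (pvBlen a - n - 1 + 1) * 2 ^ n := by rw [← pow_add]; congr 1; omega

theorem pvBRemLoop_inv {b n : Nat} (hn : 1 ≤ n) (hb : pvBlen b = n + 1) :
    ∀ a f, a < f →
      pvIsM b (a ^^^ pvBRemLoop n ((1 <<< n) - 1)
          (pvBExpsLoop ((b ^^^ (1 <<< n)) + 1) (b ^^^ (1 <<< n))) f a)
      ∧ pvBlen (pvBRemLoop n ((1 <<< n) - 1)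
          (pvBExpsLoop ((b ^^^ (1 <<< n)) + 1) (b ^^^ (1 <<< n))) f a) ≤ n := by
  intro a
  induction a using Nat.strong_induction_on with
  | _ a ih =>
    intro f hf
    obtain ⟨f', rfl⟩ : ∃ k, f = k + 1 := ⟨f - 1, by omega⟩
    rw [pvBRemLoop]
    by_cases hc : n < pvBlen a
    · rw [if_pos hc]
      have hfold := pvBExps_fold (a >>> n) (b ^^^ (1 <<< n)) ((b ^^^ (1 <<< n)) + 1)
        (a &&& ((1 <<< n) - 1)) (by omega)
      have hanew : (a &&& ((1 <<< n) - 1)) ^^^ pvClmul (b ^^^ (1 <<< n)) (a >>> n)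
          = a ^^^ pvClmul b (a >>> n) := by
        rw [pvAnd_mask a n, Nat.xor_assoc]
        congr 1
        rw [pvClmul_xor, pvClmul_pow, Nat.xor_comm (pvClmul b (a >>> n)), ← Nat.xor_assoc,
          Nat.xor_self, Nat.zero_xor]
      have ha0 : a ≠ 0 := by
        intro h0; rw [h0, pvBlen_zero] at hc; omega
      have hh0 : a >>> n ≠ 0 := by
        intro h0
        have := pvBlen_shiftRight hc
        rw [h0, pvBlen_zero] at this
        omega
      have hb0 : b ≠ 0 := by
        intro h0; rw [h0, pvBlen_zero] at hb; omega
      have hclb : pvBlen (pvClmul b (a >>> n)) = pvBlen a := by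
        rw [pvClmul_blen hh0 b hb0, hb, pvBlen_shiftRight hc]
        omega
      have hlt : a ^^^ pvClmul b (a >>> n) < a :=
        lt_of_lt_of_le (pvXor_top a _ (Nat.pos_of_ne_zero ha0) hclb) (pvBlen_le ha0)
      rw [hfold, hanew]
      obtain ⟨hrec1, hrec2⟩ := ih _ hlt f' (by omega)
      refine ⟨?_, hrec2⟩
      have hdelta : pvIsM b (a ^^^ (a ^^^ pvClmul b (a >>> n))) := by
        rw [← Nat.xor_assoc, Nat.xor_self, Nat.zero_xor]
        exact ⟨a >>> n, pvClmul_comm b (a >>> n)⟩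
      have := pvIsM_xor hdelta hrec1
      rwa [pvXor_cancel_mid] at this
    · rw [if_neg hc]
      exact ⟨by simpa using pvIsM_zero b, by omega⟩

theorem pvBRem_eq_pvMMod (a b : Nat) : pvBRem a b = pvMMod a b := by
  by_cases hb : pvBlen b ≤ 1
  · unfold pvBRem pvMMod
    rw [if_pos hb, if_pos hb]
  · have hb2 : 2 ≤ pvBlen b := by omega
    have hrem : pvBRem a b = pvBRemLoop (pvBlen b - 1) ((1 <<< (pvBlen b - 1)) - 1)
        (pvBExpsLoop ((b ^^^ (1 <<< (pvBlen b - 1))) + 1) (b ^^^ (1 <<< (pvBlen b - 1)))) (a + 1) a := by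
      unfold pvBRem
      rw [if_neg hb]
    obtain ⟨hisb, hlenb⟩ := pvBRemLoop_inv (b := b) (n := pvBlen b - 1)
      (by omega) (by omega) a (a + 1) (by omega)
    have hisM := pvMMod_isM a b hb2
    have hlenM : pvBlen (pvMMod a b) < pvBlen b := by
      have := pvMMod_blen a b hb2; omega
    rw [hrem]
    apply pvRemUnique hb2 (by omega) hlenM
    have := pvIsM_xor hisb hisM
    rwa [pvXor_swap, Nat.xor_self, Nat.zero_xor] at this

-- ---- flat gcd = Euclid gcd ----

theorem pvMGcdLoop_fuel : ∀ b a f1 f2, b < f1 → b < f2 → pvMGcdLoop f1 a b = pvMGcdLoop f2 a b := by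
  intro b
  induction b using Nat.strong_induction_on with
  | _ b ih =>
    intro a f1 f2 h1 h2
    obtain ⟨f1', rfl⟩ : ∃ k, f1 = k + 1 := ⟨f1 - 1, by omega⟩
    obtain ⟨f2', rfl⟩ : ∃ k, f2 = k + 1 := ⟨f2 - 1, by omega⟩
    rw [pvMGcdLoop, pvMGcdLoop]
    by_cases hb : b = 0
    · simp [hb]
    · rw [if_pos hb, if_pos hb]
      have hm := pvMMod_lt a b (by omega)
      exact ih (pvMMod a b) hm b f1' f2' (by omega) (by omega)

theorem pvMGcd_step {a b : Nat} (hb : b ≠ 0) : pvMGcd a b = pvMGcd b (pvMMod a b) := by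
  unfold pvMGcd
  rw [pvMGcdLoop, if_pos hb]
  exact pvMGcdLoop_fuel (pvMMod a b) b b (pvMMod a b + 1) (pvMMod_lt a b (by omega)) (by omega)

theorem pvMGcd_zero (a : Nat) : pvMGcd a 0 = a := by
  unfold pvMGcd
  rw [pvMGcdLoop]
  simp

theorem pvMMod_small {a b : Nat} (h : pvBlen a < pvBlen b) : pvMMod a b = a := by
  unfold pvMMod
  by_cases hb : pvBlen b ≤ 1
  · rw [if_pos hb]
    have ha0 : a = 0 := by
      by_contra h0
      have := pvBlen_pos (Nat.pos_of_ne_zero h0)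
      omega
    omega
  · rw [if_neg hb, pvMModLoop, if_neg (by omega)]

theorem pvMModLoop_fuel {b db : Nat} (hdb : 1 ≤ db) (hb : pvBlen b = db + 1) (a f1 f2 : Nat)
    (h1 : a < f1) (h2 : a < f2) : pvMModLoop b db f1 a = pvMModLoop b db f2 a := by
  have e1 := (pvModLoop_sim b db hdb hb a (a + 1) f1 (by omega) h1).1
  have e2 := (pvModLoop_sim b db hdb hb a (a + 1) f2 (by omega) h2).1
  exact e1.symm.trans e2

theorem pvMMod_reduce {a b : Nat} (hb : b ≠ 0) (h : pvBlen b ≤ pvBlen a) :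
    pvMMod a b = pvMMod (a ^^^ (b <<< (pvBlen a - pvBlen b))) b := by
  by_cases hb1 : pvBlen b ≤ 1
  · unfold pvMMod
    rw [if_pos hb1, if_pos hb1]
  · have hbl2 : 2 ≤ pvBlen b := by omega
    unfold pvMMod
    rw [if_neg hb1, if_neg hb1]
    have ha0 : a ≠ 0 := by
      intro h0
      subst h0
      rw [pvBlen_zero] at h
      have := pvBlen_pos (Nat.pos_of_ne_zero hb)
      omega
    have hcond : (pvBlen b - 1) + 1 ≤ pvBlen a := by omega
    rw [pvMModLoop, if_pos hcond]
    have hs : pvBlen a - 1 - (pvBlen b - 1) = pvBlen a - pvBlen b := by omega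
    rw [hs]
    have hba : pvBlen (b <<< (pvBlen a - pvBlen b)) = pvBlen a := by
      rw [pvBlen_shift b _ (Nat.pos_of_ne_zero hb)]; omega
    have ha' : a ^^^ b <<< (pvBlen a - pvBlen b) < a :=
      lt_of_lt_of_le (pvXor_top a _ (Nat.pos_of_ne_zero ha0) hba) (pvBlen_le ha0)
    exact pvMModLoop_fuel (by omega) (by omega) _ a _ (by omega) (by omega)

theorem pvBGcdLoopF_eq : ∀ f a b, a + b < f → pvBGcdLoopF f a b = pvMGcd a b := by
  intro f
  induction f with
  | zero => omega
  | succ f ih =>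
    intro a b hf
    rw [pvBGcdLoopF]
    by_cases hb : b = 0
    · rw [if_neg (by simp [hb]), hb, pvMGcd_zero]
    · rw [if_pos hb]
      by_cases ha : a = 0
      · subst ha
        rw [if_pos (by rw [pvBlen_zero]; exact pvBlen_pos (Nat.pos_of_ne_zero hb))]
        simp only [Nat.zero_shiftLeft, Nat.xor_zero]
        obtain ⟨f', rfl⟩ : ∃ k, f = k + 1 := ⟨f - 1, by omega⟩
        rw [pvBGcdLoopF, if_neg (by simp)]
        rw [pvMGcd_step hb, pvMMod_small (by rw [pvBlen_zero]; exact pvBlen_pos (Nat.pos_of_ne_zero hb)),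
          pvMGcd_zero]
      · by_cases hlt : pvBlen a < pvBlen b
        · rw [if_pos hlt]
          have hba : pvBlen (a <<< (pvBlen b - pvBlen a)) = pvBlen b := by
            rw [pvBlen_shift a _ (Nat.pos_of_ne_zero ha)]; omega
          have ha2 : b ^^^ a <<< (pvBlen b - pvBlen a) < b :=
            lt_of_lt_of_le (pvXor_top b _ (Nat.pos_of_ne_zero hb) hba) (pvBlen_le hb)
          rw [ih _ _ (by omega)]
          have e1 : pvMGcd a b = pvMGcd b a := by
            rw [pvMGcd_step hb, pvMMod_small hlt]
          have e2 : pvMGcd b a = pvMGcd a (pvMMod b a) := pvMGcd_step ha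
          have e3 : pvMMod b a = pvMMod (b ^^^ a <<< (pvBlen b - pvBlen a)) a :=
            pvMMod_reduce ha (le_of_lt hlt)
          have e4 : pvMGcd (b ^^^ a <<< (pvBlen b - pvBlen a)) a
              = pvMGcd a (pvMMod (b ^^^ a <<< (pvBlen b - pvBlen a)) a) := pvMGcd_step ha
          rw [e4, ← e3, ← e2, ← e1]
        · push_neg at hlt
          rw [if_neg (not_lt.mpr hlt)]
          have hba : pvBlen (b <<< (pvBlen a - pvBlen b)) = pvBlen a := by
            rw [pvBlen_shift b _ (Nat.pos_of_ne_zero hb)]; omega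
          have ha2 : a ^^^ b <<< (pvBlen a - pvBlen b) < a :=
            lt_of_lt_of_le (pvXor_top a _ (Nat.pos_of_ne_zero ha) hba) (pvBlen_le ha)
          rw [ih _ _ (by omega)]
          have e1 : pvMGcd a b = pvMGcd b (pvMMod a b) := pvMGcd_step hb
          have e2 : pvMMod a b = pvMMod (a ^^^ b <<< (pvBlen a - pvBlen b)) b :=
            pvMMod_reduce hb hlt
          have e3 : pvMGcd (a ^^^ b <<< (pvBlen a - pvBlen b)) b
              = pvMGcd b (pvMMod (a ^^^ b <<< (pvBlen a - pvBlen b)) b) := pvMGcd_step hb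
          rw [e3, ← e2, ← e1]

theorem pvBGcdF_eq (a b : Nat) : pvBGcdF a b = pvMGcd a b :=
  pvBGcdLoopF_eq (a + b + 1) a b (by omega)

-- ---- staged Ben-Or test = break-flag loop ----

theorem pvBUs_all_eq (p : Nat) : ∀ k u,
    ((pvBUs p k u).all (fun v => pvBGcdF p (v ^^^ 2) == 1)) = pvMIsIrredLoop p k u := by
  intro k
  induction k with
  | zero => intro u; rfl
  | succ k ih =>
    intro u
    rw [pvBUs, pvMIsIrredLoop]
    simp only [List.all_cons, pvBRem_eq_pvMMod, pvBGcdF_eq, pvBSq_eq]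
    simp only [pvBGcdF_eq] at ih
    by_cases h : pvMGcd p (pvMMod (pvSpread u) p ^^^ 2) = 1 <;> simp [h, ih]

theorem pvBIrred_eq (p : Nat) : pvBIrred p = pvMIsIrred p := by
  unfold pvBIrred pvMIsIrred
  simp only [pvBUs_all_eq]

-- ---- candidate list + find? = A's nested search loops ----

theorem pvTriPoly_eq {n i : Int} (h1 : 1 ≤ i) (h2 : i < n) :
    ((((1 : Nat) <<< (n - i).toNat) ^^^ 1) <<< i.toNat) ^^^ 1
      = (1 <<< n.toNat) ^^^ (1 <<< i.toNat) ^^^ 1 := by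
  have e1 : (n - i).toNat + i.toNat = n.toNat := by omega
  rw [pvXor_shl, pvShl_shl, e1]

theorem pvPenPoly_eq {n i j k : Int} (hk : 1 ≤ k) (hkj : k < j) (hji : j < i) (hin : i < n) :
    ((((((((1 : Nat) <<< (n - i).toNat) ^^^ 1) <<< (i - j).toNat) ^^^ 1) <<< (j - k).toNat) ^^^ 1) <<< k.toNat) ^^^ 1
      = (1 <<< n.toNat) ^^^ (1 <<< i.toNat) ^^^ (1 <<< j.toNat) ^^^ (1 <<< k.toNat) ^^^ 1 := by
  have e1 : (n - i).toNat + (i - j).toNat + (j - k).toNat + k.toNat = n.toNat := by omega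
  have e2 : (i - j).toNat + (j - k).toNat + k.toNat = i.toNat := by omega
  have e3 : (j - k).toNat + k.toNat = j.toNat := by omega
  simp only [pvXor_shl, pvShl_shl, e1, e2, e3]

theorem pvTri_find (n : Int) : ∀ l : List Int, (∀ i ∈ l, 1 ≤ i ∧ i < n) →
    pvMTriLoop n l
      = List.find? pvBIrred (l.map (fun i => (1 <<< n.toNat) ^^^ (1 <<< i.toNat) ^^^ 1)) := by
  intro l
  induction l with
  | nil => intro _; rfl
  | cons i rest ih =>
    intro h
    obtain ⟨h1, h2⟩ := h i (by simp)
    rw [pvMTriLoop, List.map_cons, List.find?_cons]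
    rw [show ((((1 : Nat) <<< (n - i).toNat) ^^^ 1) <<< i.toNat) ^^^ 1
        = (1 <<< n.toNat) ^^^ (1 <<< i.toNat) ^^^ 1 from pvTriPoly_eq h1 h2]
    rw [pvBIrred_eq]
    by_cases hirr : pvMIsIrred ((1 <<< n.toNat) ^^^ (1 <<< i.toNat) ^^^ 1) = true
    · simp [hirr]
    · simp only [Bool.not_eq_true] at hirr
      simp [hirr, ih (fun x hx => h x (by simp [hx]))]

theorem pvPenK_find (n i j : Int) (hji : j < i) (hin : i < n) :
    ∀ l : List Int, (∀ k ∈ l, 1 ≤ k ∧ k < j) →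
    pvMPenLoopK n i j l
      = List.find? pvBIrred (l.map (fun k =>
          (1 <<< n.toNat) ^^^ (1 <<< i.toNat) ^^^ (1 <<< j.toNat) ^^^ (1 <<< k.toNat) ^^^ 1)) := by
  intro l
  induction l with
  | nil => intro _; rfl
  | cons k rest ih =>
    intro h
    obtain ⟨h1, h2⟩ := h k (by simp)
    rw [pvMPenLoopK, List.map_cons, List.find?_cons]
    rw [show ((((((((1 : Nat) <<< (n - i).toNat) ^^^ 1) <<< (i - j).toNat) ^^^ 1) <<< (j - k).toNat) ^^^ 1) <<< k.toNat) ^^^ 1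
        = (1 <<< n.toNat) ^^^ (1 <<< i.toNat) ^^^ (1 <<< j.toNat) ^^^ (1 <<< k.toNat) ^^^ 1
        from pvPenPoly_eq h1 h2 hji hin]
    rw [pvBIrred_eq]
    by_cases hirr : pvMIsIrred ((1 <<< n.toNat) ^^^ (1 <<< i.toNat) ^^^ (1 <<< j.toNat) ^^^ (1 <<< k.toNat) ^^^ 1) = true
    · simp [hirr]
    · simp only [Bool.not_eq_true] at hirr
      simp [hirr, ih (fun x hx => h x (by simp [hx]))]

theorem pvPenJ_find (n i : Int) (hin : i < n) :
    ∀ l : List Int, (∀ j ∈ l, 2 ≤ j ∧ j < i) →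
    pvMPenLoopJ n i l
      = List.find? pvBIrred (l.flatMap (fun j =>
          (PySem.List.pyRange 1 j 1).map (fun k =>
            (1 <<< n.toNat) ^^^ (1 <<< i.toNat) ^^^ (1 <<< j.toNat) ^^^ (1 <<< k.toNat) ^^^ 1))) := by
  intro l
  induction l with
  | nil => intro _; rfl
  | cons j rest ih =>
    intro h
    obtain ⟨h1, h2⟩ := h j (by simp)
    rw [pvMPenLoopJ, List.flatMap_cons, List.find?_append]
    rw [← pvPenK_find n i j h2 hin (PySem.List.pyRange 1 j 1)
        (fun k hk => by rw [PySem.List.mem_pyRange_one] at hk; exact hk)]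
    rw [← ih (fun x hx => h x (by simp [hx]))]
    cases pvMPenLoopK n i j (PySem.List.pyRange 1 j 1) <;> simp [Option.orElse]

theorem pvPenI_find (n : Int) :
    ∀ l : List Int, (∀ i ∈ l, 3 ≤ i ∧ i < n) →
    pvMPenLoopI n l
      = List.find? pvBIrred (l.flatMap (fun i =>
          (PySem.List.pyRange 2 i 1).flatMap (fun j =>
            (PySem.List.pyRange 1 j 1).map (fun k =>
              (1 <<< n.toNat) ^^^ (1 <<< i.toNat) ^^^ (1 <<< j.toNat) ^^^ (1 <<< k.toNat) ^^^ 1)))) := by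
  intro l
  induction l with
  | nil => intro _; rfl
  | cons i rest ih =>
    intro h
    obtain ⟨h1, h2⟩ := h i (by simp)
    rw [pvMPenLoopI, List.flatMap_cons, List.find?_append]
    rw [← pvPenJ_find n i h2 (PySem.List.pyRange 2 i 1)
        (fun j hj => by rw [PySem.List.mem_pyRange_one] at hj; exact hj)]
    rw [← ih (fun x hx => h x (by simp [hx]))]
    cases pvMPenLoopJ n i (PySem.List.pyRange 2 i 1) <;> simp [Option.orElse]

theorem pvCands_find (n : Int) : List.find? pvBIrred (pvBCands n) = pvMSearch n := by
  unfold pvBCands pvMSearch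
  rw [List.find?_append]
  rw [← pvTri_find n (PySem.List.pyRange 1 n 1)
      (fun i hi => by rw [PySem.List.mem_pyRange_one] at hi; exact hi)]
  rw [← pvPenI_find n (PySem.List.pyRange 3 n 1)
      (fun i hi => by rw [PySem.List.mem_pyRange_one] at hi; exact hi)]
  cases pvMTriLoop n (PySem.List.pyRange 1 n 1) <;> simp [Option.orElse]

-- ===== VERDICT (by name: the statement is the Claim_ definition above) =====
theorem genIrred_spec : Claim_equal_genIrred := by
  intro n _
  unfold Spec_genIrred genIrred genIrred_alt
  rw [pvTri_sim, pvPen_sim, pvCands_find]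
  unfold pvMSearch
  cases pvMTriLoop n (PySem.List.pyRange 1 n 1) with
  | some p => rfl
  | none =>
    cases pvMPenLoopI n (PySem.List.pyRange 3 n 1) with
    | some p => rfl
    | none => rfl
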